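-- pv_equiv track=rewrite | github.com/matteoprogramming/homeworks_programming_1 | HW8req/program01.py | is_reducible
-- ===== SOURCE A (Python) =====
-- class SubString:
--     def __init__(self, value, start, end) -> None:
--         self.value = value
--         self.start = start
--         self.end = end
--
--     def __repr__(self) -> str:
--         return f"'{self.value}' start at index {self.start} and end at index {self.end}"
--
-- def split_text(text, lenght):
--     return [SubString(text[i:i+lenght], i, i+lenght) for i in range(len(text)-lenght+1)]
--
-- def get_substraction(list1, list2):
--     for c in list2:
--         try:
--             list1.remove(c)
--         except ValueError:
--             pass
--     return list1
--
-- def is_reducible(encrypted_text, pharaohs_cypher):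
--     for key in pharaohs_cypher:
--         lenght = len(key)+1
--         sub_string_list = split_text(encrypted_text, lenght)
--         for sub_string in sub_string_list:
--             substraction = get_substraction(list(sub_string.value), list(key))
--             if len(substraction) == 1:
--                 return True
--     return False
-- ===== SOURCE B (Python) =====
-- def is_reducible(encrypted_text, pharaohs_cypher):
--     n = len(encrypted_text)
--     for key in pharaohs_cypher:
--         w = len(key) + 1
--         need = {}
--         for c in key:
--             need[c] = need.get(c, 0) + 1
--         for i in range(n - w + 1):
--             window = encrypted_text[i:i+w]
--             if all(window.count(c) >= k for c, k in need.items()):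
--                 return True
--     return False
-- ===== Notes on version B (the rewrite author's own statement) =====
-- stated objective: faster
-- what changed: Replaces the per-window remove-one-occurrence multiset subtraction with a key character-count dictionary built once per key and a per-window comparison of character counts (window.count(c) >= need[c]).
import Mathlib
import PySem

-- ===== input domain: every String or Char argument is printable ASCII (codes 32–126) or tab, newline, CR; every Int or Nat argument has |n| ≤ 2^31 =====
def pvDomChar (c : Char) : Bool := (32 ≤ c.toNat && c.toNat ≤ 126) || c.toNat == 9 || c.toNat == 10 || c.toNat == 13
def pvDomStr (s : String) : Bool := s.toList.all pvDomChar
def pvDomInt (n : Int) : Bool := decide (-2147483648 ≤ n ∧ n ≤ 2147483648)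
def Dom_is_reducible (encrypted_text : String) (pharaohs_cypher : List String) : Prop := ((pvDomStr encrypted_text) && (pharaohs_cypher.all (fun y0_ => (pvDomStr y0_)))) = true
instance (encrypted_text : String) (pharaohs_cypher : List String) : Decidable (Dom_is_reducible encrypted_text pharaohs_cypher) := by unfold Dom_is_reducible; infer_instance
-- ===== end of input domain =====

-- B replaces A's per-window remove-based multiset subtraction by a key character-count
-- dictionary built once per key and a per-window count comparison (objective: faster).

-- ===== PORT A =====
-- SubString carries (value, start, end); is_reducible only reads .value
def splitText (text : List Char) (lenght : Int) : List (List Char × Int × Int) :=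
  (PySem.List.pyRange 0 ((text.length : Int) - lenght + 1) 1).map
    (fun i => (PySem.List.slice text (some i) (some (i + lenght)), i, i + lenght))

def getSubstraction (list1 list2 : List Char) : List Char :=
  list2.foldl (fun l1 c => (PySem.List.remove? l1 c).getD l1) list1

def is_reducible (encrypted_text : String) (pharaohs_cypher : List String) : Bool :=
  pharaohs_cypher.any (fun key =>
    let lenght : Int := (key.toList.length : Int) + 1
    (splitText encrypted_text.toList lenght).any
      (fun sub_string => (getSubstraction sub_string.1 key.toList).length == 1))

-- ===== PORT B =====
-- d[c] = d.get(c, 0) + 1 over a list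
def counterOf (l : List Char) : PySem.Dict Char Int :=
  l.foldl (fun d c => d.insert c (d.getD c 0 + 1)) PySem.Dict.empty

def is_reducible_alt (encrypted_text : String) (pharaohs_cypher : List String) : Bool :=
  let n : Int := (encrypted_text.toList.length : Int)
  pharaohs_cypher.any (fun key =>
    let w : Int := (key.toList.length : Int) + 1
    let need := counterOf key.toList
    (PySem.List.pyRange 0 (n - w + 1) 1).any (fun i =>
      -- window.count(c) for a single character c is the character count
      let window := PySem.List.slice encrypted_text.toList (some i) (some (i + w))
      need.items.all (fun ck => decide ((window.count ck.1 : Int) ≥ ck.2))))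

-- ===== PRECONDITION & SPEC =====
def Spec_is_reducible (encrypted_text : String) (pharaohs_cypher : List String) (out : Bool) : Prop := out = is_reducible_alt encrypted_text pharaohs_cypher
instance (encrypted_text : String) (pharaohs_cypher : List String) (out : Bool) : Decidable (Spec_is_reducible encrypted_text pharaohs_cypher out) := by unfold Spec_is_reducible; infer_instance

-- ===== CLAIM (what is proved, stated in full; the proofs are below) =====
def Claim_equal_is_reducible : Prop := ∀ (encrypted_text : String) (pharaohs_cypher : List String), Dom_is_reducible encrypted_text pharaohs_cypher → Spec_is_reducible encrypted_text pharaohs_cypher (is_reducible encrypted_text pharaohs_cypher)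

-- ===== LEMMAS AND PROOFS =====

theorem any_congr_mem {α : Type} (l : List α) (p q : α → Bool)
    (h : ∀ a ∈ l, p a = q a) : l.any p = l.any q := by
  induction l with
  | nil => rfl
  | cons x xs ih =>
    simp only [List.any_cons, h x (List.mem_cons_self), ih (fun a ha => h a (List.mem_cons_of_mem x ha))]

-- the sequential try-remove fold computes multiset subtraction
theorem gs_multiset (l2 l1 : List Char) :
    ((getSubstraction l1 l2 : List Char) : Multiset Char) = (l1 : Multiset Char) - (l2 : Multiset Char) := by
  induction l2 generalizing l1 with
  | nil => simp [getSubstraction]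
  | cons c l2 ih =>
    have hstep : ((PySem.List.remove? l1 c).getD l1 : Multiset Char) = ((l1 : Multiset Char)).erase c := by
      by_cases hc : c ∈ l1
      · rw [PySem.List.remove?_eq_some_erase l1 c hc]
        simp [Multiset.coe_erase]
      · rw [(PySem.List.remove?_eq_none_iff l1 c).mpr hc]
        simp [List.erase_of_not_mem hc]
    show ((getSubstraction ((PySem.List.remove? l1 c).getD l1) l2 : List Char) : Multiset Char) = _
    rw [ih, hstep]
    rw [← Multiset.cons_coe, Multiset.sub_cons]

-- card (s - t) = 1 with card s = card t + 1 characterises t ≤ s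
theorem card_sub_eq_one_iff (s t : Multiset Char) (h : Multiset.card s = Multiset.card t + 1) :
    Multiset.card (s - t) = 1 ↔ t ≤ s := by
  constructor
  · intro h1
    have hsum : Multiset.card (s - t) + Multiset.card (s ∩ t) = Multiset.card s := by
      rw [← Multiset.card_add, Multiset.sub_add_inter]
    have hcard : Multiset.card t ≤ Multiset.card (s ∩ t) := by omega
    have heq : s ∩ t = t := Multiset.eq_of_le_of_card_le Multiset.inter_le_right hcard
    calc t = s ∩ t := heq.symm
      _ ≤ s := Multiset.inter_le_left
  · intro hle
    rw [Multiset.card_sub hle]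
    omega

-- A's per-window test equals B's per-window count test, given |window| = |key| + 1
theorem window_test (window key : List Char) (hlen : window.length = key.length + 1) :
    ((getSubstraction window key).length == 1)
      = (counterOf key).items.all (fun ck => decide ((window.count ck.1 : Int) ≥ ck.2)) := by
  have hgs : (getSubstraction window key).length
      = Multiset.card ((window : Multiset Char) - (key : Multiset Char)) := by
    rw [← gs_multiset]; simp
  have hiff : ((getSubstraction window key).length = 1) ↔
      ∀ c ∈ key, key.count c ≤ window.count c := by
    rw [hgs, card_sub_eq_one_iff _ _ (by simpa using hlen),
      Multiset.le_iff_count]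
    constructor
    · intro h c _
      have := h c
      simpa using this
    · intro h c
      by_cases hc : c ∈ key
      · simpa using h c hc
      · simp [List.count_eq_zero_of_not_mem hc]
  have hitems : (counterOf key) = PySem.Dict.counter key := by
    simpa [counterOf] using PySem.Dict.foldl_insert_getD_add_one_eq_counter (xs := key)
  rw [hitems, PySem.Dict.items_counter]
  rcases Bool.eq_false_or_eq_true ((getSubstraction window key).length == 1) with hb | hb
  · rw [hb]
    symm
    rw [List.all_eq_true]
    intro ck hck
    simp only [List.mem_map] at hck
    obtain ⟨c, hc, rfl⟩ := hck
    have hmem : c ∈ key := (PySem.Set.mem_ofList (xs := key) (y := c)).mp hc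
    have := hiff.mp (by simpa using hb) c hmem
    simp [this]
  · rw [hb]
    symm
    rw [List.all_eq_false]
    have : ¬ ∀ c ∈ key, key.count c ≤ window.count c := by
      intro h; exact absurd (hiff.mpr h) (by simpa using hb)
    push Not at this
    obtain ⟨c, hc, hlt⟩ := this
    refine ⟨(c, (key.count c : Int)), ?_, ?_⟩
    · simp only [List.mem_map]
      exact ⟨c, (PySem.Set.mem_ofList (xs := key) (y := c)).mpr hc, rfl⟩
    · simp [hlt]

-- slice length inside the scanned range
theorem window_length (text : List Char) (w i : Int) (hw : 1 ≤ w) (hi : 0 ≤ i)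
    (hub : i < (text.length : Int) - w + 1) :
    (PySem.List.slice text (some i) (some (i + w))).length = w.toNat := by
  rw [PySem.List.slice_toNat text hi (by omega)]
  simp only [List.length_take, List.length_drop]
  omega

theorem per_key (text : List Char) (key : List Char) :
    (splitText text ((key.length : Int) + 1)).any
        (fun sub_string => (getSubstraction sub_string.1 key).length == 1)
      = (PySem.List.pyRange 0 ((text.length : Int) - ((key.length : Int) + 1) + 1) 1).any
          (fun i =>
            (counterOf key).items.all (fun ck =>
              decide (((PySem.List.slice text (some i) (some (i + ((key.length : Int) + 1)))).count ck.1 : Int) ≥ ck.2))) := by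
  rw [splitText, List.any_map]
  apply any_congr_mem
  intro i hi
  rw [PySem.List.mem_pyRange_one] at hi
  apply window_test
  rw [window_length text ((key.length : Int) + 1) i (by omega) hi.1 (by omega)]
  omega

-- ===== VERDICT (by name: the statement is the Claim_ definition above) =====
theorem is_reducible_spec : Claim_equal_is_reducible := by
  intro encrypted_text pharaohs_cypher _
  show is_reducible encrypted_text pharaohs_cypher = is_reducible_alt encrypted_text pharaohs_cypher
  rw [is_reducible, is_reducible_alt]
  apply any_congr_mem
  intro key _
  exact per_key encrypted_text.toList key.toList
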